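-- pv_equiv track=rewrite | github.com/svetlanaklinova/pythonsolutions | python/main/generators/str2.py | calculateWays
-- ===== SOURCE A (Python) =====
-- def calculateWays( wordlen , maxvowels):
--
--     #if max vowels = 0 calculating ways
--
--     if maxvowels==0:
--
--         ways = 1
--
--         #loop for calculating ways
--
--         for i in range(wordlen):
--             ways = ways*21
--
--
--
--         return ways
--
--
--
--     else:
--
--
--
--         if wordlen == 1: #if word length is 1
--
--             c,v = 1,1
--
--             ways = c * 21 + v * 5 #calculating ways
--
--             return ways
--
--         else: #if max vowels and world length both are greater then 1
--
--             ways = 0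
--
--             # patterns with combinations
--
--             for i in range(wordlen):
--
--                 c,v = 1,1
--
--                 for j in range(wordlen-maxvowels):
--                     c = c * 21
--
--                 for k in range(maxvowels):
--                     v = v * 5
--
--                 ways = ways + (v*c) #calculating ways with vowels
--
--             # consonants only
--
--             # ways1 = 1
--             ways1 = 21 ** wordlen
--             # for i in range(wordlen):
--             #     ways1 = ways1*21
--
--             ways = ways + ways1
--
--             # vowels only
--
--             if maxvowels == wordlen:
--                 ways2 = 5 ** wordlen
--
--                 ways = ways + ways2
--
--
--
--             return ways # return total ways
-- ===== SOURCE B (Python) =====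
-- def _ipow(base, exp):
--     # integer exponentiation by squaring
--     result = 1
--     while exp > 0:
--         if exp & 1:
--             result *= base
--         base *= base
--         exp >>= 1
--     return result
--
--
-- def calculateWays(wordlen, maxvowels):
--     if maxvowels == 0:
--         return _ipow(21, wordlen)
--     if wordlen == 1:
--         return 26
--     total = wordlen * _ipow(5, maxvowels) * _ipow(21, wordlen - maxvowels) + _ipow(21, wordlen)
--     if maxvowels == wordlen:
--         total += _ipow(5, wordlen)
--     return total
-- ===== Notes on version B (the rewrite author's own statement) =====
-- stated objective: faster
-- what changed: Replaced the O(wordlen^2) nested multiplication loops by the closed-form expression wordlen*5^maxvowels*21^(wordlen-maxvowels) + 21^wordlen (+5^wordlen when maxvowels==wordlen), with the powers computed by a hand-written integer exponentiation-by-squaring; Pre_ excludes negative wordlen with maxvowels nonzero, where A's '21 ** wordlen' returns a float rather than an int.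
-- outside the precondition, e.g. on calculateWays(-2, 1): A returns 0.0022675736961451248, B returns -9
import Mathlib
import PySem

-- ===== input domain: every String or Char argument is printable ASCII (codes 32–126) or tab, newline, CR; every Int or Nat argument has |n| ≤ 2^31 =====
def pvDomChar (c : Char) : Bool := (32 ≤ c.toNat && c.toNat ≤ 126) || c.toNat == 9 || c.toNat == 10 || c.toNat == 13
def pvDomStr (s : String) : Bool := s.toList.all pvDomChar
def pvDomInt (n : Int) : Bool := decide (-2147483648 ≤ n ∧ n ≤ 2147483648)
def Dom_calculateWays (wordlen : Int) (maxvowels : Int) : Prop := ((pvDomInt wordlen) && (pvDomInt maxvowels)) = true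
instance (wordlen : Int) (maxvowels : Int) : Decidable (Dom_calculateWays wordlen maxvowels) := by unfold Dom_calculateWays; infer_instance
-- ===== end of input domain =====

-- B replaces A's O(wordlen^2) multiplication loops by a closed-form product whose powers are computed by
-- exponentiation-by-squaring (objective: faster).

-- ===== PORT A =====
-- literal transliteration of A; Python's '21 ** wordlen' / '5 ** wordlen' are ported as ^ with .toNat
-- exponent, exact on Pre_ (that branch is only reached with 0 ≤ wordlen there)
def calculateWays (wordlen : Int) (maxvowels : Int) : Int :=
  if maxvowels == 0 then
    (PySem.List.pyRange 0 wordlen 1).foldl (fun ways _ => ways * 21) 1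
  else
    if wordlen == 1 then
      1 * 21 + 1 * 5
    else
      let ways := (PySem.List.pyRange 0 wordlen 1).foldl (fun ways _ =>
        let c := (PySem.List.pyRange 0 (wordlen - maxvowels) 1).foldl (fun c _ => c * 21) 1
        let v := (PySem.List.pyRange 0 maxvowels 1).foldl (fun v _ => v * 5) 1
        ways + v * c) 0
      let ways1 : Int := 21 ^ wordlen.toNat
      let ways := ways + ways1
      if maxvowels == wordlen then ways + 5 ^ wordlen.toNat else ways

-- ===== PORT B =====
-- the 'while exp > 0' loop of Source B's _ipow; on a positive int, 'exp & 1' is mod exp 2 and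
-- 'exp >>= 1' is floordiv exp 2 (exact)
def pvIpowLoop (result : Int) (base : Int) (exp : Int) : Int :=
  if _h : 0 < exp then
    pvIpowLoop (if PySem.Int.mod exp 2 == 1 then result * base else result)
      (base * base) (PySem.Int.floordiv exp 2)
  else
    result
termination_by exp.toNat
decreasing_by
  have := PySem.Int.floordiv_eq_ediv_of_pos (a := exp) (b := 2) (by omega)
  omega

def ipow (base : Int) (exp : Int) : Int := pvIpowLoop 1 base exp

def calculateWays_alt (wordlen : Int) (maxvowels : Int) : Int :=
  if maxvowels == 0 then
    ipow 21 wordlen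
  else if wordlen == 1 then
    26
  else
    let total : Int := wordlen * ipow 5 maxvowels * ipow 21 (wordlen - maxvowels)
                       + ipow 21 wordlen
    if maxvowels == wordlen then total + ipow 5 wordlen else total

-- ===== PRECONDITION & SPEC =====
-- Pre_ excludes negative wordlen with maxvowels nonzero: there A's '21 ** wordlen' yields a float,
-- so A does not return an int.
def Pre_calculateWays (wordlen : Int) (maxvowels : Int) : Prop := maxvowels = 0 ∨ 0 ≤ wordlen
instance (wordlen : Int) (maxvowels : Int) : Decidable (Pre_calculateWays wordlen maxvowels) := by unfold Pre_calculateWays; infer_instance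
def pvWitness_calculateWays : Int × Int := (3, 2)
def Spec_calculateWays (wordlen : Int) (maxvowels : Int) (out : Int) : Prop := out = calculateWays_alt wordlen maxvowels
instance (wordlen : Int) (maxvowels : Int) (out : Int) : Decidable (Spec_calculateWays wordlen maxvowels out) := by unfold Spec_calculateWays; infer_instance

-- ===== CLAIM (what is proved, stated in full; the proofs are below) =====
def Claim_equal_calculateWays : Prop := ∀ (wordlen : Int) (maxvowels : Int), Dom_calculateWays wordlen maxvowels → Pre_calculateWays wordlen maxvowels → Spec_calculateWays wordlen maxvowels (calculateWays wordlen maxvowels)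

-- ===== LEMMAS AND PROOFS =====

-- the squaring loop computes result * base ^ exp (exponent clamped at 0, as the loop runs only for 0 < exp)
theorem pvIpowLoop_eq_aux (n : Nat) : ∀ (exp result base : Int), exp.toNat ≤ n →
    pvIpowLoop result base exp = result * base ^ exp.toNat := by
  induction n with
  | zero =>
    intro exp result base hle
    have h : ¬ 0 < exp := by omega
    unfold pvIpowLoop
    simp [h, show exp.toNat = 0 by omega]
  | succ n ih =>
    intro exp result base hle
    unfold pvIpowLoop
    by_cases h : 0 < exp
    · simp only [h, dite_true]
      have hd0 := PySem.Int.floordiv_eq_ediv_of_pos (a := exp) (b := 2) (by omega : (0:Int) < 2)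
      rw [ih _ _ _ (by omega)]
      have hd := PySem.Int.floordiv_eq_ediv_of_pos (a := exp) (b := 2) (by omega : (0:Int) < 2)
      have hm := PySem.Int.mod_eq_emod_of_pos (a := exp) (b := 2) (by omega : (0:Int) < 2)
      have hn : ((PySem.Int.floordiv exp 2).toNat) = exp.toNat / 2 := by omega
      have hsplit : exp.toNat = 2 * (exp.toNat / 2) + exp.toNat % 2 := (Nat.div_add_mod _ _).symm ▸ by omega
      by_cases hpar : PySem.Int.mod exp 2 = 1
      · have : exp.toNat % 2 = 1 := by omega
        simp only [hpar, beq_self_eq_true, if_true, hn]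
        calc result * base * (base * base) ^ (exp.toNat / 2)
            = result * (base ^ (2 * (exp.toNat / 2) + 1)) := by
              rw [pow_succ, pow_mul]; ring
          _ = result * base ^ exp.toNat := by rw [show 2 * (exp.toNat / 2) + 1 = exp.toNat by omega]
      · have hm2 : PySem.Int.mod exp 2 = 0 := by
          have := Int.emod_two_eq exp; omega
        have : exp.toNat % 2 = 0 := by omega
        simp only [hm2, if_false, hn, show ((0:Int) == 1) = false by decide, Bool.false_eq_true]
        calc result * (base * base) ^ (exp.toNat / 2)
            = result * base ^ (2 * (exp.toNat / 2)) := by rw [pow_mul]; ring_nf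
          _ = result * base ^ exp.toNat := by rw [show 2 * (exp.toNat / 2) = exp.toNat by omega]
    · have : exp.toNat = 0 := by omega
      simp [h, this]

theorem pvIpowLoop_eq (exp : Int) (result base : Int) :
    pvIpowLoop result base exp = result * base ^ exp.toNat :=
  pvIpowLoop_eq_aux exp.toNat exp result base le_rfl

theorem ipow_eq (base exp : Int) : ipow base exp = base ^ exp.toNat := by
  unfold ipow; rw [pvIpowLoop_eq]; ring

-- A's multiply-by-k loop over any list is a * k ^ length
theorem pvFoldlMulConst (l : List Int) (a k : Int) :
    l.foldl (fun x _ => x * k) a = a * k ^ l.length := by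
  induction l generalizing a with
  | nil => simp
  | cons h t ih => simp [List.foldl_cons, ih, pow_succ]; ring

-- A's add-a-constant loop over any list is a + length * c
theorem pvFoldlAddConst (l : List Int) (a c : Int) :
    l.foldl (fun x _ => x + c) a = a + (l.length : Int) * c := by
  induction l generalizing a with
  | nil => simp
  | cons h t ih => simp [List.foldl_cons, ih]; ring

theorem calculateWays_spec : Claim_equal_calculateWays := by
  intro wordlen maxvowels _ hpre
  unfold Spec_calculateWays calculateWays calculateWays_alt
  by_cases hm : maxvowels = 0
  · simp only [hm, beq_self_eq_true, if_true]
    rw [pvFoldlMulConst, ipow_eq]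
    simp [PySem.List.length_pyRange_one]
  · have hw : 0 ≤ wordlen := hpre.resolve_left hm
    simp only [beq_iff_eq, hm, if_false]
    by_cases h1 : wordlen = 1
    · simp [h1]
    · simp only [h1, if_false]
      rw [pvFoldlMulConst, pvFoldlMulConst, pvFoldlAddConst, ipow_eq, ipow_eq, ipow_eq]
      have e4 : (wordlen.toNat : Int) = wordlen := by omega
      simp only [PySem.List.length_pyRange_one, sub_zero, e4]
      rw [ipow_eq]
      split_ifs <;> ring
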